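-- pv_equiv track=rewrite | github.com/varad-comrad/Intpy | scrapped/functions_to_benchmark/secundarios/pernicious.py | find_pernicious_numbers
-- ===== SOURCE A (Python) =====
-- def is_prime_number(n):
--     if n in (2, 3):
--         return True
--     if 2 > n or 0 == n % 2:
--         return False
--     if 9 > n:
--         return True
--     if 0 == n % 3:
--         return False
--
--     return not any(map(
--         lambda x: 0 == n % x or 0 == n % (2 + x),
--         range(5, 1 + int(n ** 0.5), 6)
--     ))
--
-- def get_number_of_ones(n):
--     return bin(n).count("1")
--
-- def find_pernicious_numbers(n):
--     i = 1
--     counter = 0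
--     while counter < n:
--         if is_prime_number(get_number_of_ones(i)):
--             counter += 1
--         i += 1
--     return i-1, counter
-- ===== SOURCE B (Python) =====
-- # Counting + binary search: _count(X) = how many m in [1..X] have a prime popcount,
-- # computed by a memoized divide-by-2 recursion; the answer is the least X with _count(X) >= n.
--
-- def _is_prime(m):
--     if m < 2:
--         return False
--     d = 2
--     while d * d <= m:
--         if m % d == 0:
--             return False
--         d += 1
--     return True
--
-- _memo = {}
--
-- def _f(X, j):
--     # number of m in [0, X) such that popcount(m) + j is prime
--     if X == 0:
--         return 0
--     if X == 1:
--         return 1 if _is_prime(j) else 0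
--     key = (X, j)
--     v = _memo.get(key)
--     if v is None:
--         h = X // 2
--         if X % 2 == 0:
--             v = _f(h, j) + _f(h, j + 1)
--         else:
--             v = _f(h + 1, j) + _f(h, j + 1)
--         _memo[key] = v
--     return v
--
-- def _count(X):
--     return _f(X + 1, 0)
--
-- def find_pernicious_numbers(n):
--     if n <= 0:
--         return (0, 0)
--     k = 0
--     while _count(1 << k) < n:
--         k += 1
--     lo, hi = 1, 1 << k
--     while lo < hi:
--         mid = (lo + hi) // 2
--         if _count(mid) >= n:
--             hi = mid
--         else:
--             lo = mid + 1
--     return (lo, n)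
-- ===== Notes on version B (the rewrite author's own statement) =====
-- stated objective: faster
-- what changed: A scans the integers one by one, testing each popcount for primality until the counter reaches n; B instead computes how many numbers <= X have a prime popcount with a memoized divide-by-two counting recursion and finds the n-th pernicious number as the least X whose count reaches n, by doubling then binary search.
import Mathlib
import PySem

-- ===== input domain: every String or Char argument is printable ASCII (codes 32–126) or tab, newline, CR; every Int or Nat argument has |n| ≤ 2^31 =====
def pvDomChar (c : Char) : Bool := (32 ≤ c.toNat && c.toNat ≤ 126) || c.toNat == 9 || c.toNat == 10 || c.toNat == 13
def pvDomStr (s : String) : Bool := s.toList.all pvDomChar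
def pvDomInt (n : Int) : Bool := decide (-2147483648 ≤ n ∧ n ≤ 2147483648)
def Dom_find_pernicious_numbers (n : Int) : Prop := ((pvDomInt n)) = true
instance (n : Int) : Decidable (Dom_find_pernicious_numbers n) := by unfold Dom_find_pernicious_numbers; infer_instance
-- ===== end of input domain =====

-- B replaces A's linear scan (test every i for a prime popcount until n hits) by a memoized
-- divide-by-two counting recursion plus binary search for the least X whose count reaches n.

-- ---- shared popcount / counting facts, used by the ports' termination proofs (cited in decreasing_by) ----

/-- popcount of a natural number, as Python's bit_count. -/
def pvPc (m : Nat) : Nat := PySem.Int.bitCount (m : Int)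

theorem pvPc_zero : pvPc 0 = 0 := PySem.Int.bitCount_zero

theorem pvPc_two_mul (m : Nat) : pvPc (2 * m) = pvPc m := by
  rcases Nat.eq_zero_or_pos m with h | h
  · subst h; rfl
  · have h2 : 0 < 2 * m := by omega
    have := PySem.Int.bitCount_natCast h2
    simpa [pvPc, Nat.mul_mod_right, Nat.mul_div_cancel_left m (by norm_num : 0 < 2)] using this

theorem pvPc_two_mul_add_one (m : Nat) : pvPc (2 * m + 1) = pvPc m + 1 := by
  have h2 : 0 < 2 * m + 1 := by omega
  have := PySem.Int.bitCount_natCast h2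
  have hmod : (2 * m + 1) % 2 = 1 := by omega
  have hdiv : (2 * m + 1) / 2 = m := by omega
  simp only [pvPc, this, hmod, hdiv]; omega

theorem pvPc_three_two_pow (k : Nat) : pvPc (3 * 2 ^ k) = 2 := by
  induction k with
  | zero => decide
  | succ k ih =>
      have : 3 * 2 ^ (k + 1) = 2 * (3 * 2 ^ k) := by ring
      rw [this, pvPc_two_mul, ih]

/-- splitting a count over range (2Y) into even and odd members -/
theorem pvCountP_two_mul (q : Nat → Bool) (Y : Nat) :
    (List.range (2 * Y)).countP q
      = (List.range Y).countP (fun m => q (2 * m)) + (List.range Y).countP (fun m => q (2 * m + 1)) := by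
  induction Y with
  | zero => simp
  | succ Y ih =>
      have h : 2 * (Y + 1) = (2 * Y + 1) + 1 := by ring
      rw [h]
      simp only [List.range_succ]
      simp [List.countP_append, List.countP_cons, ih]
      omega

/-- among m < 2^k exactly (k choose t) have popcount t -/
theorem pvCount_pc_pow (k : Nat) : ∀ t : Nat,
    (List.range (2 ^ k)).countP (fun m => decide (pvPc m = t)) = Nat.choose k t := by
  induction k with
  | zero =>
      intro t
      cases t <;> simp [pvPc_zero]
  | succ k ih =>
      intro t
      have h : 2 ^ (k + 1) = 2 * 2 ^ k := by ring
      rw [h, pvCountP_two_mul]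
      have he : (List.range (2 ^ k)).countP (fun m => decide (pvPc (2 * m) = t))
          = Nat.choose k t := by
        rw [← ih t]; exact List.countP_congr (fun x _ => by simp [pvPc_two_mul])
      cases t with
      | zero =>
          have ho : (List.range (2 ^ k)).countP (fun m => decide (pvPc (2 * m + 1) = 0)) = 0 := by
            apply List.countP_eq_zero.mpr
            intro x _
            simp [pvPc_two_mul_add_one]
          rw [he, ho]; simp
      | succ s =>
          have ho : (List.range (2 ^ k)).countP (fun m => decide (pvPc (2 * m + 1) = s + 1))
              = Nat.choose k s := by
            rw [← ih s]; exact List.countP_congr (fun x _ => by simp [pvPc_two_mul_add_one])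
          rw [he, ho, Nat.choose_succ_succ']
          omega

-- ===== PORT A =====
-- helpers of A, transliterated

/-- Python: bin(n).count("1") — the number of 1s in the binary digits of |n| (PySem.Int.bitCount). -/
def get_number_of_ones (n : Int) : Int := (PySem.Int.bitCount n : Int)

/-- Python is_prime_number, branch for branch.  int(n ** 0.5) is ported as Nat.sqrt, which is what
    the float computes on the small values (popcounts) this helper is applied to. -/
def is_prime_number (n : Int) : Bool :=
  if n = 2 ∨ n = 3 then true
  else if 2 > n ∨ PySem.Int.mod n 2 = 0 then false
  else if 9 > n then true
  else if PySem.Int.mod n 3 = 0 then false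
  else ! ((PySem.List.pyRange 5 (1 + (Nat.sqrt n.toNat : Int)) 6).any
      (fun x => decide (PySem.Int.mod n x = 0) || decide (PySem.Int.mod n (2 + x) = 0)))

/-- beyond every i there is a number A's loop counts (3·2^i has popcount 2) — for termination. -/
theorem pvExistsPernA (i : Nat) :
    ∃ m, i ≤ m ∧ is_prime_number (get_number_of_ones ((m : Nat) : Int)) = true := by
  refine ⟨3 * 2 ^ i, ?_, ?_⟩
  · have := Nat.lt_two_pow_self (n := i)
    omega
  · have h : get_number_of_ones ((3 * 2 ^ i : Nat) : Int) = ((pvPc (3 * 2 ^ i) : Nat) : Int) := rfl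
    rw [h, pvPc_three_two_pow]
    decide

/-- the next index ≥ i that A's loop counts — termination measure only. -/
def pvNextA (i : Nat) : Nat := Nat.find (pvExistsPernA i)

theorem pv_sub_dec {n c : Nat} (h : c < n) : n - (c + 1) < n - c := by omega

theorem pv_next_dec (i : Nat)
    (hp : ¬ is_prime_number (get_number_of_ones ((i : Nat) : Int)) = true) :
    pvNextA (i + 1) - (i + 1) < pvNextA i - i := by
  have h4 : i ≤ pvNextA i := (Nat.find_spec (pvExistsPernA i)).1
  have h2 : i ≠ pvNextA i := by
    intro h
    exact hp (by rw [h]; exact (Nat.find_spec (pvExistsPernA i)).2)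
  have h3 : pvNextA (i + 1) ≤ pvNextA i :=
    Nat.find_min' (pvExistsPernA (i + 1)) ⟨by omega, (Nat.find_spec (pvExistsPernA i)).2⟩
  omega

/-- the while-loop of A as tail recursion on its state (i, counter), kept as Nat (in Python both
    stay ≥ 0; the comparison counter < n is n.toNat-exact since for n ≤ 0 the body never runs). -/
def loopA (n i c : Nat) : List Int :=
  if c < n then
    if is_prime_number (get_number_of_ones (i : Int)) then loopA n (i + 1) (c + 1)
    else loopA n (i + 1) c
  else [(i : Int) - 1, (c : Int)]
termination_by (n - c, pvNextA i - i)
decreasing_by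
  · exact Prod.Lex.left _ _ (pv_sub_dec ‹_›)
  · exact Prod.Lex.right _ (pv_next_dec i ‹_›)

def find_pernicious_numbers (n : Int) : List Int := loopA n.toNat 1 0

-- ===== PORT B =====
-- helpers of Source B, transliterated

/-- Python _is_prime's while d*d <= n loop. -/
theorem pv_trial_dec {m d : Nat} (h : d * d ≤ m) :
    Nat.sqrt m + 1 - (d + 1) < Nat.sqrt m + 1 - d := by
  have := Nat.le_sqrt.mpr h
  omega

def trialDivB (m d : Nat) : Bool :=
  if d * d ≤ m then (if m % d = 0 then false else trialDivB m (d + 1)) else true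
termination_by Nat.sqrt m + 1 - d
decreasing_by exact pv_trial_dec ‹_›

def _is_prime (m : Nat) : Bool := if m < 2 then false else trialDivB m 2

theorem pv_half_dec {X : Nat} (h0 : ¬ X = 0) : X / 2 < X := by omega

theorem pv_half_succ_dec {X : Nat} (h1 : ¬ X = 1) (h2 : ¬ X % 2 = 0) :
    X / 2 + 1 < X := by omega

/-- Python _f(X, j): number of m < X with popcount(m) + j prime (the memo cache only speeds
    Python up; the recursion and its values are identical). -/
def cntF (X j : Nat) : Nat :=
  if X = 0 then 0
  else if X = 1 then (if _is_prime j then 1 else 0)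
  else if X % 2 = 0 then cntF (X / 2) j + cntF (X / 2) (j + 1)
  else cntF (X / 2 + 1) j + cntF (X / 2) (j + 1)
termination_by X
decreasing_by
  · exact pv_half_dec ‹_›
  · exact pv_half_dec ‹_›
  · exact pv_half_succ_dec ‹_› ‹_›
  · exact pv_half_dec ‹_›

/-- Python _count(X) -/
def countB (X : Nat) : Nat := cntF (X + 1) 0

-- counting facts needed for the termination of B's doubling loop (growB, cited in decreasing_by)

theorem pvCntF_eq (X j : Nat) :
    cntF X j = (List.range X).countP (fun m => _is_prime (pvPc m + j)) := by
  induction X, j using cntF.induct with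
  | case1 j => rw [cntF]; simp
  | case2 j h _ => rw [cntF]; simp [pvPc_zero, h]
  | case3 j h _ => rw [cntF]; simp [pvPc_zero, h]
  | case4 X j h0 h1 h2 ih1 ih2 =>
      rw [cntF, if_neg h0, if_neg h1, if_pos h2, ih1, ih2]
      conv_rhs => rw [show X = 2 * (X / 2) from by omega]
      rw [pvCountP_two_mul]
      congr 1
      · exact List.countP_congr (fun x _ => by rw [pvPc_two_mul])
      · exact List.countP_congr (fun x _ => by
          rw [show pvPc (2 * x + 1) + j = pvPc x + (j + 1) from by
            rw [pvPc_two_mul_add_one]; omega])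
  | case5 X j h0 h1 h2 ih1 ih2 =>
      rw [cntF, if_neg h0, if_neg h1, if_neg h2, ih1, ih2, List.range_succ,
        List.countP_append]
      conv_rhs => rw [show X = 2 * (X / 2) + 1 from by omega, List.range_succ,
        List.countP_append, pvCountP_two_mul]
      have he : (List.range (X / 2)).countP (fun m => _is_prime (pvPc m + j))
          = (List.range (X / 2)).countP (fun m => _is_prime (pvPc (2 * m) + j)) :=
        List.countP_congr (fun x _ => by rw [pvPc_two_mul])
      have ho : (List.range (X / 2)).countP (fun m => _is_prime (pvPc m + (j + 1)))
          = (List.range (X / 2)).countP (fun m => _is_prime (pvPc (2 * m + 1) + j)) :=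
        List.countP_congr (fun x _ => by
          rw [show pvPc (2 * x + 1) + j = pvPc x + (j + 1) from by
            rw [pvPc_two_mul_add_one]; omega])
      rw [he, ho]
      have hl : ([X / 2].countP (fun m => _is_prime (pvPc m + j)))
          = ([2 * (X / 2)].countP (fun m => _is_prime (pvPc m + j))) := by
        simp [List.countP_cons, pvPc_two_mul]
      rw [hl]
      omega

/-- the predicate B counts -/
def pvPern (m : Nat) : Bool := _is_prime (pvPc m)

/-- number of pernicious numbers ≤ x -/
def pvCnt (x : Nat) : Nat := (List.range (x + 1)).countP pvPern

theorem pvCountB_eq (X : Nat) : countB X = pvCnt X := by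
  rw [countB, pvCntF_eq, pvCnt]
  exact List.countP_congr (fun x _ => by simp [pvPern])

theorem pv_is_prime_two : _is_prime 2 = true := by
  rw [_is_prime]
  norm_num
  rw [trialDivB]
  norm_num

theorem pvChoose_le_cnt_pow (k : Nat) : Nat.choose k 2 ≤ pvCnt (2 ^ k) := by
  calc Nat.choose k 2 = (List.range (2 ^ k)).countP (fun m => decide (pvPc m = 2)) :=
        (pvCount_pc_pow k 2).symm
    _ ≤ (List.range (2 ^ k)).countP pvPern := by
        apply List.countP_mono_left
        intro x _ hx
        have h2 : pvPc x = 2 := by simpa using hx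
        rw [pvPern, h2, pv_is_prime_two]
    _ ≤ pvCnt (2 ^ k) := List.Sublist.countP_le (List.range_sublist.mpr (by omega))

theorem pvChoose_two_ge (k : Nat) : k - 1 ≤ Nat.choose k 2 := by
  rw [Nat.choose_two_right]
  match k with
  | 0 => simp
  | 1 => simp
  | (k + 2) =>
      have h1 : k + 2 - 1 = k + 1 := rfl
      rw [h1]
      have h : 2 * (k + 1) ≤ (k + 2) * (k + 1) := Nat.mul_le_mul_right _ (by omega)
      have := Nat.div_le_div_right (c := 2) h
      omega

theorem pv_grow_dec {n k : Nat} (h : countB (2 ^ k) < n) : n + 2 - (k + 1) < n + 2 - k := by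
  have h1 : Nat.choose k 2 ≤ countB (2 ^ k) := by
    rw [pvCountB_eq]; exact pvChoose_le_cnt_pow k
  have h2 := pvChoose_two_ge k
  omega

/-- Python's  k = 0; while _count(1 << k) < n: k += 1;  returning hi = 1 << k. -/
def growB (n k : Nat) : Nat :=
  if countB (2 ^ k) < n then growB n (k + 1) else 2 ^ k
termination_by n + 2 - k
decreasing_by exact pv_grow_dec ‹_›

theorem pv_bis_dec1 {lo hi : Nat} (h : lo < hi) : (lo + hi) / 2 - lo < hi - lo := by omega

theorem pv_bis_dec2 {lo hi : Nat} (h : lo < hi) : hi - ((lo + hi) / 2 + 1) < hi - lo := by omega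

/-- Python's bisection loop on [lo, hi]. -/
def bisectB (n lo hi : Nat) : Nat :=
  if lo < hi then
    let mid := (lo + hi) / 2
    if n ≤ countB mid then bisectB n lo mid else bisectB n (mid + 1) hi
  else lo
termination_by hi - lo
decreasing_by
  · exact pv_bis_dec1 ‹_›
  · exact pv_bis_dec2 ‹_›

def find_pernicious_numbers_alt (n : Int) : List Int :=
  if n ≤ 0 then [0, 0]
  else
    let hi := growB n.toNat 0
    [(bisectB n.toNat 1 hi : Int), n]

-- ===== PRECONDITION & SPEC =====
def Spec_find_pernicious_numbers (n : Int) (out : List Int) : Prop := out = find_pernicious_numbers_alt n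
instance (n : Int) (out : List Int) : Decidable (Spec_find_pernicious_numbers n out) := by unfold Spec_find_pernicious_numbers; infer_instance

-- ===== CLAIM (what is proved, stated in full; the proofs are below) =====
def Claim_equal_find_pernicious_numbers : Prop := ∀ (n : Int), Dom_find_pernicious_numbers n → Spec_find_pernicious_numbers n (find_pernicious_numbers n)

-- ===== LEMMAS AND PROOFS =====

theorem pvEx (n : Nat) : ∃ X : Nat, n ≤ pvCnt X := by
  refine ⟨2 ^ (n + 2), le_trans ?_ (pvChoose_le_cnt_pow (n + 2))⟩
  rw [Nat.choose_two_right]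
  have h1 : n + 2 - 1 = n + 1 := rfl
  rw [h1]
  have h : 2 * n ≤ (n + 2) * (n + 1) := by nlinarith
  have := Nat.div_le_div_right (c := 2) h
  omega

/-- least X with pvCnt X ≥ n -/
def pvTarget (n : Nat) : Nat := Nat.find (pvEx n)

theorem pvCnt_mono {x y : Nat} (h : x ≤ y) : pvCnt x ≤ pvCnt y :=
  List.Sublist.countP_le (List.range_sublist.mpr (by omega))


theorem trialDivB_iff (m : Nat) : ∀ d : Nat,
    trialDivB m d = true ↔ ∀ e, d ≤ e → e * e ≤ m → m % e ≠ 0 := by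
  intro d
  induction d using trialDivB.induct (m := m) with
  | case2 d h hm ih =>
      rw [trialDivB, if_pos h, if_neg hm, ih]
      constructor
      · intro H e he hee
        rcases Nat.eq_or_lt_of_le he with rfl | hlt
        · exact hm
        · exact H e (by omega) hee
      · intro H e he hee
        exact H e (by omega) hee
  | case1 d h hm =>
      rw [trialDivB, if_pos h, if_pos hm]
      simp only [Bool.false_eq_true, false_iff]
      intro H
      exact H d (le_refl d) h hm
  | case3 d h =>
      rw [trialDivB, if_neg h]
      simp only [true_iff]
      intro e he hee
      have : d * d ≤ e * e := Nat.mul_le_mul he he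
      omega

theorem isPrimeB_iff (m : Nat) : _is_prime m = true ↔ Nat.Prime m := by
  rw [_is_prime]
  split_ifs with h
  · simp only [false_iff]
    intro hp
    exact absurd hp.two_le (by omega)
  · rw [trialDivB_iff, Nat.prime_def_le_sqrt]
    constructor
    · intro H
      refine ⟨by omega, ?_⟩
      intro e he hsq hd
      exact H e he (Nat.le_sqrt.mp hsq) (Nat.dvd_iff_mod_eq_zero.mp hd)
    · rintro ⟨-, H⟩ e he hee hmod
      exact H e he (Nat.le_sqrt.mpr hee) (Nat.dvd_iff_mod_eq_zero.mpr hmod)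

theorem isPrimeA_iff (k : Nat) : is_prime_number ((k : Nat) : Int) = true ↔ Nat.Prime k := by
  rw [is_prime_number]
  have hm2 : PySem.Int.mod (k : Int) 2 = ((k % 2 : Nat) : Int) := by
    exact_mod_cast PySem.Int.mod_natCast k 2
  have hm3 : PySem.Int.mod (k : Int) 3 = ((k % 3 : Nat) : Int) := by
    exact_mod_cast PySem.Int.mod_natCast k 3
  split_ifs with h1 h2 h3 h4
  · -- k = 2 or k = 3
    have hk : k = 2 ∨ k = 3 := by omega
    simp only [true_iff]
    rcases hk with rfl | rfl <;> norm_num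
  · -- k < 2 or k even (and k ∉ {2,3}): not prime
    simp only [false_iff]
    intro hp
    rcases h2 with hlt | hmod
    · exact absurd hp.two_le (by omega)
    · rw [hm2] at hmod
      have hk2 : k % 2 = 0 := by exact_mod_cast hmod
      have : 2 ∣ k := by omega
      rcases (Nat.Prime.eq_one_or_self_of_dvd hp 2 this) with h | h <;> omega
  · -- 2 < k < 9, odd, not 2 or 3: k ∈ {5, 7}
    simp only [true_iff]
    have hk2 : ¬ ((2:Int) > (k:Int) ∨ PySem.Int.mod (k : Int) 2 = 0) := h2
    push Not at hk2
    obtain ⟨ha, hb⟩ := hk2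
    rw [hm2] at hb
    have hb' : k % 2 ≠ 0 := fun h => hb (by exact_mod_cast congrArg (Nat.cast : Nat → Int) h)
    have hk : k = 5 ∨ k = 7 := by omega
    rcases hk with rfl | rfl <;> norm_num
  · -- k ≥ 9, 3 ∣ k: not prime
    simp only [false_iff]
    intro hp
    rw [hm3] at h4
    have hk3 : k % 3 = 0 := by exact_mod_cast h4
    have : 3 ∣ k := by omega
    rcases (Nat.Prime.eq_one_or_self_of_dvd hp 3 this) with h | h <;> omega
  · -- main branch: k ≥ 9, odd, not divisible by 3
    push Not at h1 h2 h3 h4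
    obtain ⟨ha, hb⟩ := h2
    rw [hm2] at hb
    rw [hm3] at h4
    have hk9 : 9 ≤ k := by omega
    have hk2 : k % 2 = 1 := by
      have : k % 2 ≠ 0 := fun h => hb (by exact_mod_cast congrArg (Nat.cast : Nat → Int) h)
      omega
    have hk3 : k % 3 ≠ 0 := fun h => h4 (by exact_mod_cast congrArg (Nat.cast : Nat → Int) h)
    have htn : ((k : Int)).toNat = k := rfl
    rw [htn, Bool.not_eq_eq_eq_not, Bool.not_true, List.any_eq_false]
    constructor
    · -- no 6t±1 divisor up to sqrt k  →  prime
      intro H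
      by_contra hnp
      set q := k.minFac with hq
      have hqp : Nat.Prime q := Nat.minFac_prime (by omega)
      have hqd : q ∣ k := Nat.minFac_dvd k
      have hqs : q * q ≤ k := by
        have := Nat.minFac_sq_le_self (by omega : 0 < k) hnp
        nlinarith [this]
      have hq2 : q ≠ 2 := by
        intro h
        have : 2 ∣ k := h ▸ hqd
        omega
      have hq3 : q ≠ 3 := by
        intro h
        have : 3 ∣ k := h ▸ hqd
        omega
      have hqge2 : 2 ≤ q := hqp.two_le
      have hq2d : ¬ 2 ∣ q := by
        intro h
        rcases hqp.eq_one_or_self_of_dvd 2 h with h' | h' <;> omega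
      have hq3d : ¬ 3 ∣ q := by
        intro h
        rcases hqp.eq_one_or_self_of_dvd 3 h with h' | h' <;> omega
      have hq6 : q % 6 = 1 ∨ q % 6 = 5 := by omega
      have hqsqrt : q ≤ Nat.sqrt k := Nat.le_sqrt.mpr hqs
      have hkq : k % q = 0 := by omega
      have hmodq : PySem.Int.mod (k : Int) (q : Int) = ((k % q : Nat) : Int) := by
        exact_mod_cast PySem.Int.mod_natCast k q
      rcases hq6 with h6 | h6
      · -- q % 6 = 1, witness x = q - 2
        have hq7 : 7 ≤ q := by omega
        have hx := H ((q : Int) - 2) ?_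
        · simp only [Bool.or_eq_true, decide_eq_true_eq, not_or] at hx
          refine hx.2 ?_
          rw [show (2 : Int) + ((q : Int) - 2) = ((q : Nat) : Int) from by ring,
            hmodq, hkq]
          norm_num
        · rw [PySem.List.mem_pyRange_iff_of_pos (by norm_num)]
          refine ⟨by omega, by omega, by omega⟩
      · -- q % 6 = 5, witness x = q
        have hx := H ((q : Nat) : Int) ?_
        · simp only [Bool.or_eq_true, decide_eq_true_eq, not_or] at hx
          refine hx.1 ?_
          rw [hmodq, hkq]
          norm_num
        · rw [PySem.List.mem_pyRange_iff_of_pos (by norm_num)]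
          refine ⟨by omega, by omega, by omega⟩
    · -- prime → no such divisor
      intro hp x hx
      rw [PySem.List.mem_pyRange_iff_of_pos (by norm_num)] at hx
      obtain ⟨hx5, hxu, -⟩ := hx
      have hsk : Nat.sqrt k < k := Nat.sqrt_lt_self (by omega)
      have hxs : x.toNat ≤ Nat.sqrt k := by omega
      have hxeq : x = ((x.toNat : Nat) : Int) := by omega
      simp only [Bool.or_eq_true, decide_eq_true_eq, not_or]
      constructor
      · rw [hxeq, PySem.Int.mod_natCast]
        intro hmod
        have hmn : k % x.toNat = 0 := by exact_mod_cast hmod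
        have hdvd : x.toNat ∣ k := by omega
        rcases hp.eq_one_or_self_of_dvd _ hdvd with h | h <;> omega
      · rw [show (2 : Int) + x = ((x.toNat + 2 : Nat) : Int) from by omega,
          PySem.Int.mod_natCast]
        intro hmod
        have hmn : k % (x.toNat + 2) = 0 := by exact_mod_cast hmod
        have hdvd : (x.toNat + 2) ∣ k := by omega
        rcases hp.eq_one_or_self_of_dvd _ hdvd with h | h
        · omega
        · have hsq : (k - 2) ≤ Nat.sqrt k := by omega
          have hsq2 : (k - 2) * (k - 2) ≤ k := Nat.le_sqrt.mp hsq
          have h7 : 7 * (k - 2) ≤ (k - 2) * (k - 2) :=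
            Nat.mul_le_mul_right _ (by omega)
          omega

theorem pvCondA (i : Nat) :
    (is_prime_number (get_number_of_ones ((i : Nat) : Int)) = true) ↔ pvPern i = true := by
  have h : get_number_of_ones ((i : Nat) : Int) = ((pvPc i : Nat) : Int) := rfl
  rw [h, isPrimeA_iff, pvPern, isPrimeB_iff]

theorem pvCnt_succ (i : Nat) (h : 1 ≤ i) :
    pvCnt i = pvCnt (i - 1) + (if pvPern i then 1 else 0) := by
  have h1 : i - 1 + 1 = i := by omega
  rw [pvCnt, pvCnt, h1, List.range_succ, List.countP_append]
  simp [List.countP_cons]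

theorem loopA_eq (n i c : Nat) :
    1 ≤ i → pvCnt (i - 1) = c → c < n →
      loopA n i c = [((pvTarget n : Nat) : Int), (n : Int)] := by
  induction i, c using loopA.induct (n := n) with
  | case1 i c hlt hp ih =>
      intro h1 hc _
      have hci : pvCnt i = c + 1 := by
        rw [pvCnt_succ i h1, hc, if_pos ((pvCondA i).mp hp)]
      rw [loopA, if_pos hlt, if_pos hp]
      by_cases h2 : c + 1 < n
      · exact ih (by omega) (by simpa using hci) h2
      · have hn : n = c + 1 := by omega
        rw [loopA, if_neg (by omega)]
        have htgt : pvTarget n = i := by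
          rw [pvTarget, Nat.find_eq_iff]
          constructor
          · omega
          · intro x hx hnx
            have hmono : pvCnt x ≤ pvCnt (i - 1) := pvCnt_mono (by omega)
            omega
        rw [htgt, hn]
        simp only [List.cons.injEq, and_true]
        push_cast
        ring
  | case2 i c hlt hp ih =>
      intro h1 hc hlt2
      have hci : pvCnt i = c := by
        rw [pvCnt_succ i h1, hc, if_neg (fun hh => hp ((pvCondA i).mpr hh))]
        omega
      exact (by rw [loopA, if_pos hlt, if_neg hp]
                exact ih (by omega) (by simpa using hci) hlt2)
  | case3 i c hlt =>
      intro _ _ h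
      omega

theorem bisectB_eq_aux (n d : Nat) : ∀ lo hi, hi - lo ≤ d →
    lo ≤ pvTarget n → pvTarget n ≤ hi → bisectB n lo hi = pvTarget n := by
  induction d with
  | zero =>
      intro lo hi hd hl hh
      rw [bisectB, if_neg (by omega)]
      omega
  | succ d ih =>
      intro lo hi hd hl hh
      by_cases h : lo < hi
      · rw [bisectB, if_pos h]
        show (if n ≤ countB ((lo + hi) / 2) then bisectB n lo ((lo + hi) / 2)
              else bisectB n ((lo + hi) / 2 + 1) hi) = pvTarget n
        by_cases hc : n ≤ countB ((lo + hi) / 2)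
        · rw [if_pos hc]
          refine ih lo ((lo + hi) / 2) (by omega) hl ?_
          exact Nat.find_min' (pvEx n) (by rw [← pvCountB_eq]; exact hc)
        · rw [if_neg hc]
          refine ih ((lo + hi) / 2 + 1) hi (by omega) ?_ hh
          by_contra hx
          have hle : pvTarget n ≤ (lo + hi) / 2 := by omega
          have hs := Nat.find_spec (pvEx n)
          have hmono : pvCnt (pvTarget n) ≤ pvCnt ((lo + hi) / 2) := pvCnt_mono hle
          rw [pvCountB_eq] at hc
          exact hc (by exact le_trans hs hmono)
      · rw [bisectB, if_neg h]
        omega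

theorem bisectB_eq (n lo hi : Nat) (h1 : lo ≤ pvTarget n) (h2 : pvTarget n ≤ hi) :
    bisectB n lo hi = pvTarget n :=
  bisectB_eq_aux n (hi - lo) lo hi (le_refl _) h1 h2

theorem growB_ge (n k : Nat) : n ≤ pvCnt (growB n k) := by
  induction k using growB.induct (n := n) with
  | case1 k h ih => rw [growB, if_pos h]; exact ih
  | case2 k h => rw [growB, if_neg h]; rw [pvCountB_eq] at h; omega

-- ===== VERDICT (by name: the statement is the Claim_ definition above) =====
theorem find_pernicious_numbers_spec : Claim_equal_find_pernicious_numbers := by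
  intro n _
  unfold Spec_find_pernicious_numbers find_pernicious_numbers find_pernicious_numbers_alt
  by_cases hn : n ≤ 0
  · have h0 : n.toNat = 0 := by omega
    rw [h0, if_pos hn, loopA]
    norm_num
  · rw [if_neg hn]
    show loopA n.toNat 1 0 = [((bisectB n.toNat 1 (growB n.toNat 0) : Nat) : Int), n]
    have hnn : 1 ≤ n.toNat := by omega
    have hc0 : pvCnt 0 = 0 := by decide
    have hA := loopA_eq n.toNat 1 0 (by omega) (by simpa using hc0) hnn
    have htgt1 : 1 ≤ pvTarget n.toNat := by
      by_contra h
      have h0 : pvTarget n.toNat = 0 := by omega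
      have hs := Nat.find_spec (pvEx n.toNat)
      rw [show Nat.find (pvEx n.toNat) = pvTarget n.toNat from rfl, h0, hc0] at hs
      omega
    have htgt2 : pvTarget n.toNat ≤ growB n.toNat 0 :=
      Nat.find_min' _ (growB_ge n.toNat 0)
    have hB := bisectB_eq n.toNat 1 (growB n.toNat 0) htgt1 htgt2
    rw [hA, hB]
    have : ((n.toNat : Nat) : Int) = n := by omega
    rw [this]
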